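-- pv_equiv track=rewrite | github.com/milesmackenzie/python_scripts | project_us_births.py | dom_births
-- ===== SOURCE A (Python) =====
-- def dom_births(input_lst):
--     data = input_lst
--     day_of_month = {}
--     for item in data:
--         if item[2] not in day_of_month:
--             day_of_month[item[2]] = item[4]
--         else:
--             day_of_month[item[2]] += item[4]
--
--     return day_of_month
-- ===== SOURCE B (Python) =====
-- def dom_births(input_lst):
--     keys = list(dict.fromkeys(item[2] for item in input_lst))
--     return {k: sum(item[4] for item in input_lst if item[2] == k) for k in keys}
-- ===== Notes on version B (the rewrite author's own statement) =====
-- stated objective: alternative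
-- what changed: A builds the result by updating a running-total dict row by row; B first collects the distinct day-of-month keys (dict.fromkeys, first-occurrence order) and then computes each key's total with one sum over the matching rows.
import Mathlib
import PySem

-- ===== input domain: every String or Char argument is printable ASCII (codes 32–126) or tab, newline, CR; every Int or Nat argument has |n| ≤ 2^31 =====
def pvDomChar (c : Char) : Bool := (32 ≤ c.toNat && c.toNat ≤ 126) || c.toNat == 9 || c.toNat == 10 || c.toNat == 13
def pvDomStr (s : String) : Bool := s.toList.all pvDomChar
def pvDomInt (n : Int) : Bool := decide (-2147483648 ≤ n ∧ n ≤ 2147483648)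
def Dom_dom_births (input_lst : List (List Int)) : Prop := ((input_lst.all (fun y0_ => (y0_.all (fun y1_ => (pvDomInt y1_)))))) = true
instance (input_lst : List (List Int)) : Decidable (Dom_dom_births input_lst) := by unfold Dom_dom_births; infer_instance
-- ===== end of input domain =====

-- B replaces A's running-total dictionary with a two-phase pipeline (dedup the keys, then one sum per key); objective: alternative decomposition, not speed.

-- ===== PORT A =====
-- A: one pass, incrementally updating a dict keyed by item[2] with running totals of item[4].
def dom_births (input_lst : List (List Int)) : List (Int × Int) :=
  (input_lst.foldl (fun d item =>
      let k := PySem.List.pyGetD item 2 0   -- exact under Pre_ (row length ≥ 5)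
      let v := PySem.List.pyGetD item 4 0
      if d.contains k = false then d.insert k v else d.modify k 0 (· + v))
    PySem.Dict.empty).items

-- ===== PORT B =====
-- B: distinct keys in first-occurrence order, then one sum per key over the whole list.
def dom_births_alt (input_lst : List (List Int)) : List (Int × Int) :=
  let keys := PySem.List.dedup (input_lst.map (fun item => PySem.List.pyGetD item 2 0))
  keys.map (fun k =>
    (k, ((input_lst.filter (fun item => PySem.List.pyGetD item 2 0 == k)).map
          (fun item => PySem.List.pyGetD item 4 0)).sum))

-- ===== PRECONDITION & SPEC =====
-- Pre_ excludes rows shorter than 5 elements, on which A raises IndexError (item[2]/item[4]).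
def Pre_dom_births (input_lst : List (List Int)) : Prop :=
  ∀ item ∈ input_lst, 5 ≤ item.length
instance (input_lst : List (List Int)) : Decidable (Pre_dom_births input_lst) := by unfold Pre_dom_births; infer_instance
def pvWitness_dom_births : List (List Int) := [[2016, 1, 7, 3, 100], [2016, 2, 7, 4, 25], [2016, 3, 9, 5, 1]]

def Spec_dom_births (input_lst : List (List Int)) (out : List (Int × Int)) : Prop := out = dom_births_alt input_lst
instance (input_lst : List (List Int)) (out : List (Int × Int)) : Decidable (Spec_dom_births input_lst out) := by unfold Spec_dom_births; infer_instance

-- ===== CLAIM (what is proved, stated in full; the proofs are below) =====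
def Claim_equal_dom_births : Prop := ∀ (input_lst : List (List Int)), Dom_dom_births input_lst → Pre_dom_births input_lst → Spec_dom_births input_lst (dom_births input_lst)

-- ===== LEMMAS AND PROOFS =====

-- A's branching step is one dict-modify step (insert of a fresh key = modify with default 0).
theorem pv_step_eq (d : PySem.Dict Int Int) (k v : Int) :
    (if d.contains k = false then d.insert k v else d.modify k 0 (· + v)) = d.modify k 0 (· + v) := by
  by_cases h : d.contains k = false
  · simp only [h, if_true, PySem.Dict.modify, PySem.Dict.getD_of_not_contains _ _ h]
    norm_num
  · simp [h]

-- running total at key k after the modify loop = previous total + sum of matching values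
theorem pv_getD_loop (l : List (List Int)) (d : PySem.Dict Int Int) (k : Int) :
    (l.foldl (fun d item => d.modify (PySem.List.pyGetD item 2 0) 0 (· + PySem.List.pyGetD item 4 0)) d).getD k 0
      = d.getD k 0 + ((l.filter (fun item => PySem.List.pyGetD item 2 0 == k)).map
          (fun item => PySem.List.pyGetD item 4 0)).sum := by
  induction l generalizing d with
  | nil => simp
  | cons x xs ih =>
    simp only [List.foldl_cons, ih, List.filter_cons]
    by_cases h : PySem.List.pyGetD x 2 0 = k
    · simp [h, PySem.Dict.getD_modify_self]; ring
    · simp [h, PySem.Dict.getD_modify, Ne.symm h]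

theorem pv_eq (l : List (List Int)) : dom_births l = dom_births_alt l := by
  unfold dom_births dom_births_alt
  have hstep : (fun (d : PySem.Dict Int Int) (item : List Int) =>
      let k := PySem.List.pyGetD item 2 0
      let v := PySem.List.pyGetD item 4 0
      if d.contains k = false then d.insert k v else d.modify k 0 (· + v))
    = (fun d item => d.modify (PySem.List.pyGetD item 2 0) 0 (· + PySem.List.pyGetD item 4 0)) := by
    funext d item
    exact pv_step_eq d _ _
  rw [hstep]
  set F := fun (d : PySem.Dict Int Int) item => d.modify (PySem.List.pyGetD item 2 0) 0 (· + PySem.List.pyGetD item 4 0) with hF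
  have hnd : (l.foldl F PySem.Dict.empty).keys.Nodup :=
    PySem.Dict.nodup_keys_foldl_modify_key l (fun item => PySem.List.pyGetD item 2 0) 0
      (fun d item x => x + PySem.List.pyGetD item 4 0) PySem.Dict.empty (by simp)
  have hkeys : (l.foldl F PySem.Dict.empty).keys
      = PySem.List.dedup (l.map (fun item => PySem.List.pyGetD item 2 0)) := by
    rw [hF, PySem.Dict.keys_foldl_modify_key]
    simp [PySem.Set.update, PySem.Set.ofList]
  rw [PySem.Dict.items_eq_map_keys _ hnd 0, hkeys]
  refine List.map_congr_left ?_
  intro k hk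
  simp only [hF]
  rw [pv_getD_loop]
  simp

-- ===== VERDICT (by name: the statement is the Claim_ definition above) =====
theorem dom_births_spec : Claim_equal_dom_births := by
  intro l _ _
  exact pv_eq l
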